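-- pv_equiv track=rewrite | github.com/anarkaytis/LeetCode | n3714.py | longestTriple
-- ===== SOURCE A (Python) =====
-- def longestTriple(s: str) -> int:
--     n = len(s)
--     result = 0
--     level = (0, 0)
--     firstSeen = {}
--     firstSeen[level] = -1
--
--     for i in range(n):
--         if s[i] == 'a':
--             level = (level[0] + 2, level[1])
--         elif s[i] == 'b':
--             level = (level[0] - 1, level[1] + 1)
--         else:
--             level = (level[0] - 1, level[1] - 1)
--         if level not in firstSeen:
--             firstSeen[level] = i
--         else:
--             result = max(result, i - firstSeen[level])
--
--     return result
-- ===== SOURCE B (Python) =====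
-- def longestTriple(s: str) -> int:
--     n = len(s)
--     result = 0
--     for i in range(n):
--         x, y = 0, 0
--         for j in range(i, n):
--             c = s[j]
--             if c == 'a':
--                 x, y = x + 2, y
--             elif c == 'b':
--                 x, y = x - 1, y + 1
--             else:
--                 x, y = x - 1, y - 1
--             if x == 0 and y == 0:
--                 result = max(result, j - i + 1)
--     return result
-- ===== Notes on version B (the rewrite author's own statement) =====
-- stated objective: alternative
-- what changed: Replaced the single-pass first-seen hashmap of prefix states by a hashmap-free nested rescan: for every start index a running (x,y) delta is recomputed and the result updated whenever it returns to (0,0).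
import Mathlib
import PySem

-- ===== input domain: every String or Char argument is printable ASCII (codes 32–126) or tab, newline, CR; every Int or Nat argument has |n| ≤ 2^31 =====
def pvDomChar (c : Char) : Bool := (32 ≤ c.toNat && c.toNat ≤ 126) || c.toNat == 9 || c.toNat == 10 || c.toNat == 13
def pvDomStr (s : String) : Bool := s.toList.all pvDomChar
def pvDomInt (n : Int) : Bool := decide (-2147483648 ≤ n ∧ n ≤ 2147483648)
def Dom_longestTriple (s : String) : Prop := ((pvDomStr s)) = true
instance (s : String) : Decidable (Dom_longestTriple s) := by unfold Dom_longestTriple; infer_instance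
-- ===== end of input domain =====

-- B replaces A's single-pass first-seen hashmap of prefix states by a hashmap-free nested
-- rescan from every start index (alternative decomposition, not faster).

-- ===== PORT A =====
-- per-character delta of the (x, y) balance state, shared by both ports' if/elif/else chain
def ltDelta (c : Char) : Int × Int :=
  if c = 'a' then (2, 0) else if c = 'b' then (-1, 1) else (-1, -1)

-- one iteration of A's `for i in range(n)` body; `cs.getD i ' '` is s[i] (exact: i < len(s))
def ltStepA (cs : List Char) (st : Int × (Int × Int) × PySem.Dict (Int × Int) Int) (i : Nat) :
    Int × (Int × Int) × PySem.Dict (Int × Int) Int :=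
  let level := st.2.1 + ltDelta (cs.getD i ' ')
  match st.2.2.get? level with
  | none => (st.1, level, st.2.2.insert level (i : Int))
  | some v => (max st.1 ((i : Int) - v), level, st.2.2)

def longestTriple (s : String) : Int :=
  let cs := s.toList
  ((List.range cs.length).foldl (ltStepA cs)
      (0, (0, 0), PySem.Dict.empty.insert (0, 0) (-1))).1

-- ===== PORT B =====
-- one iteration of B's inner `for j in range(i, n)` body; `cs.getD j ' '` is s[j] (exact: j < len(s))
def ltStepB (cs : List Char) (i : Nat) (st : (Int × Int) × Int) (j : Nat) : (Int × Int) × Int :=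
  let xy := st.1 + ltDelta (cs.getD j ' ')
  (xy, if xy = (0, 0) then max st.2 ((j : Int) - (i : Int) + 1) else st.2)

def longestTriple_alt (s : String) : Int :=
  let cs := s.toList
  (List.range cs.length).foldl
    (fun result i => ((List.range' i (cs.length - i)).foldl (ltStepB cs i) ((0, 0), result)).2) 0

-- ===== PRECONDITION & SPEC =====
def Spec_longestTriple (s : String) (out : Int) : Prop := out = longestTriple_alt s
instance (s : String) (out : Int) : Decidable (Spec_longestTriple s out) := by unfold Spec_longestTriple; infer_instance

-- ===== CLAIM (what is proved, stated in full; the proofs are below) =====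
def Claim_equal_longestTriple : Prop := ∀ (s : String), Dom_longestTriple s → Spec_longestTriple s (longestTriple s)

-- ===== LEMMAS AND PROOFS =====

-- prefix state after the first k characters
def ltS (cs : List Char) (k : Nat) : Int × Int := ((cs.take k).map ltDelta).sum

theorem ltS_zero (cs : List Char) : ltS cs 0 = 0 := by simp [ltS]

theorem ltS_succ (cs : List Char) (k : Nat) (h : k < cs.length) :
    ltS cs (k+1) = ltS cs k + ltDelta (cs.getD k ' ') := by
  unfold ltS
  rw [List.take_succ_eq_append_getElem h, List.map_append, List.sum_append,
    List.getD_eq_getElem cs ' ' h]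
  simp

theorem ltFiEx (cs : List Char) (j : Nat) : ∃ i, i ≤ j ∧ ltS cs i = ltS cs j := ⟨j, le_refl j, rfl⟩

-- first index whose prefix state equals that of index j
def ltFi (cs : List Char) (j : Nat) : Nat := Nat.find (ltFiEx cs j)

theorem ltFi_le (cs : List Char) (j : Nat) : ltFi cs j ≤ j := (Nat.find_spec (ltFiEx cs j)).1

theorem ltFi_state (cs : List Char) (j : Nat) : ltS cs (ltFi cs j) = ltS cs j :=
  (Nat.find_spec (ltFiEx cs j)).2

theorem ltFi_min (cs : List Char) {i j : Nat} (hle : i ≤ j) (hS : ltS cs i = ltS cs j) :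
    ltFi cs j ≤ i := Nat.find_le ⟨hle, hS⟩

theorem ltFi_congr (cs : List Char) {i j : Nat} (hle : i ≤ j) (hS : ltS cs i = ltS cs j) :
    ltFi cs i = ltFi cs j := by
  apply le_antisymm
  · exact Nat.find_le ⟨ltFi_min cs hle hS, (ltFi_state cs j).trans hS.symm⟩
  · exact Nat.find_le ⟨le_trans (ltFi_le cs i) hle, (ltFi_state cs i).trans hS⟩

-- A's running result after the first k iterations
def ltF (cs : List Char) (k : Nat) : Nat := (Finset.range (k+1)).sup (fun j => j - ltFi cs j)

-- B's inner-loop contribution for start index i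
def ltH (cs : List Char) (i : Nat) : Nat :=
  ((Finset.Icc (i+1) cs.length).filter (fun u => ltS cs u = ltS cs i)).sup (fun u => u - i)

def ltG (cs : List Char) : Nat := (Finset.range cs.length).sup (ltH cs)

-- invariant of A's loop
def ltAInv (cs : List Char) (k : Nat) (st : Int × (Int × Int) × PySem.Dict (Int × Int) Int) : Prop :=
  st.1 = (ltF cs k : Int) ∧ st.2.1 = ltS cs k ∧
  (∀ j ≤ k, st.2.2.get? (ltS cs j) = some ((ltFi cs j : Int) - 1)) ∧
  (∀ x : Int × Int, (∀ j ≤ k, ltS cs j ≠ x) → st.2.2.get? x = none)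

theorem ltA_loop (cs : List Char) :
    ∀ k, k ≤ cs.length →
    ltAInv cs k ((List.range k).foldl (ltStepA cs) (0, (0, 0), PySem.Dict.empty.insert (0, 0) (-1))) := by
  intro k
  induction k with
  | zero =>
    intro _
    rw [List.range_zero, List.foldl_nil]
    unfold ltAInv
    refine ⟨?_, ?_, ?_, ?_⟩
    · simp [ltF, Finset.range_one]
    · rw [ltS_zero, Prod.mk_zero_zero]
    · intro j hj
      have hj0 : j = 0 := Nat.le_zero.mp hj
      subst hj0
      have hfi0 : ltFi cs 0 = 0 := Nat.le_zero.mp (ltFi_le cs 0)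
      rw [ltS_zero, ← Prod.mk_zero_zero, PySem.Dict.get?_insert_self, hfi0]
      norm_num
    · intro x hx
      have hne : x ≠ ((0, 0) : Int × Int) := by
        intro he
        exact hx 0 (le_refl 0) (by rw [ltS_zero, he, Prod.mk_zero_zero])
      rw [PySem.Dict.get?_insert_of_ne _ _ hne, PySem.Dict.get?_empty]
  | succ k ih =>
    intro hk
    have hkk : k ≤ cs.length := by omega
    obtain ⟨h1, h2, h3, h4⟩ := ih hkk
    rw [List.range_succ, List.foldl_append, List.foldl_cons, List.foldl_nil]
    set st := (List.range k).foldl (ltStepA cs) (0, (0, 0), PySem.Dict.empty.insert (0, 0) (-1)) with hst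
    have hlev : st.2.1 + ltDelta (cs.getD k ' ') = ltS cs (k+1) := by
      rw [h2, ← ltS_succ cs k (by omega)]
    have hFsucc : ltF cs (k+1) = (k + 1 - ltFi cs (k+1)) ⊔ ltF cs k := by
      unfold ltF
      rw [Finset.range_add_one, Finset.sup_insert]
    by_cases hex : ∃ j, j ≤ k ∧ ltS cs j = ltS cs (k+1)
    · obtain ⟨j₀, hj₀, hS₀⟩ := hex
      have hfij : ltFi cs j₀ = ltFi cs (k+1) := ltFi_congr cs (by omega) hS₀
      have hgetj : st.2.2.get? (ltS cs (k+1)) = some ((ltFi cs (k+1) : Int) - 1) := by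
        rw [← hS₀, h3 j₀ hj₀, hfij]
      have hstep : ltStepA cs st k
          = (max st.1 ((k : Int) - ((ltFi cs (k+1) : Int) - 1)), ltS cs (k+1), st.2.2) := by
        simp only [ltStepA, hlev, hgetj]
      rw [hstep]
      unfold ltAInv
      refine ⟨?_, rfl, ?_, ?_⟩
      · have hfile : ltFi cs (k+1) ≤ k + 1 := ltFi_le cs (k+1)
        rw [h1, hFsucc, Nat.cast_max, sup_comm]
        omega
      · intro j hj
        by_cases hjk : j ≤ k
        · exact h3 j hjk
        · have hje : j = k + 1 := by omega
          subst hje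
          exact hgetj
      · intro x hx
        exact h4 x (fun j hj => hx j (by omega))
    · have hex' : ∀ j ≤ k, ltS cs j ≠ ltS cs (k+1) := fun j hj hS => hex ⟨j, hj, hS⟩
      have hgetn : st.2.2.get? (ltS cs (k+1)) = none := h4 _ hex'
      have hfi : ltFi cs (k+1) = k + 1 := by
        apply le_antisymm (ltFi_le cs (k+1))
        by_contra hlt
        exact hex' (ltFi cs (k+1)) (by omega) (ltFi_state cs (k+1))
      have hstep : ltStepA cs st k
          = (st.1, ltS cs (k+1), st.2.2.insert (ltS cs (k+1)) (k : Int)) := by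
        simp only [ltStepA, hlev, hgetn]
      rw [hstep]
      unfold ltAInv
      refine ⟨?_, rfl, ?_, ?_⟩
      · rw [h1, Nat.cast_inj, hFsucc, hfi]
        simp
      · intro j hj
        by_cases hjk : j ≤ k
        · rw [PySem.Dict.get?_insert_of_ne _ _ (hex' j hjk)]
          exact h3 j hjk
        · have hje : j = k + 1 := by omega
          subst hje
          rw [PySem.Dict.get?_insert_self, hfi]
          norm_num
      · intro x hx
        have hne : x ≠ ltS cs (k+1) := fun he => hx (k+1) (le_refl _) he.symm
        rw [PySem.Dict.get?_insert_of_ne _ _ hne]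
        exact h4 x (fun j hj => hx j (by omega))

theorem longestTriple_eq (s : String) :
    longestTriple s = (ltF s.toList s.toList.length : Int) := by
  exact (ltA_loop s.toList s.toList.length (le_refl _)).1

theorem ltB_inner (cs : List Char) (i : Nat) :
    ∀ (k t : Nat) (m : Nat), i ≤ t → t + k ≤ cs.length →
    ((List.range' t k).foldl (ltStepB cs i) (ltS cs t - ltS cs i, (m : Int))).2
      = ((m ⊔ ((Finset.Icc (t+1) (t+k)).filter (fun u => ltS cs u = ltS cs i)).sup (fun u => u - i) : Nat) : Int) := by
  intro k
  induction k with
  | zero =>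
    intro t m hit htk
    rw [Finset.Icc_eq_empty_of_lt (by omega : t + 0 < t + 1)]
    simp
  | succ k ih =>
    intro t m hit htk
    have ht : t < cs.length := by omega
    rw [List.range'_succ, List.foldl_cons]
    have haddk : t + 1 + k = t + (k + 1) := by omega
    have hdec : Finset.Icc (t+1) (t+(k+1)) = insert (t+1) (Finset.Icc (t+1+1) (t+(k+1))) :=
      (Finset.insert_Icc_add_one_left_eq_Icc (by omega)).symm
    by_cases h : ltS cs (t+1) = ltS cs i
    · have hstep : ltStepB cs i (ltS cs t - ltS cs i, (m : Int)) t
          = (ltS cs (t+1) - ltS cs i, ((m ⊔ (t+1-i) : Nat) : Int)) := by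
        simp only [ltStepB, sub_add_eq_add_sub, ← ltS_succ cs t ht]
        rw [if_pos (by rw [Prod.mk_zero_zero, sub_eq_zero]; exact h)]
        congr 1
        rw [Nat.cast_max]
        congr 1
        omega
      rw [hstep, ih (t+1) (m ⊔ (t+1-i)) (by omega) (by omega)]
      rw [Nat.cast_inj]
      rw [haddk, hdec, Finset.filter_insert, if_pos h, Finset.sup_insert, sup_assoc]
    · have hstep : ltStepB cs i (ltS cs t - ltS cs i, (m : Int)) t
          = (ltS cs (t+1) - ltS cs i, (m : Int)) := by
        simp only [ltStepB, sub_add_eq_add_sub, ← ltS_succ cs t ht]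
        rw [if_neg (by rw [Prod.mk_zero_zero, sub_eq_zero]; exact h)]
      rw [hstep, ih (t+1) m (by omega) (by omega)]
      rw [Nat.cast_inj]
      rw [haddk, hdec, Finset.filter_insert, if_neg h]

theorem ltB_outer (cs : List Char) :
    ∀ k, k ≤ cs.length →
    (List.range k).foldl
        (fun result i => ((List.range' i (cs.length - i)).foldl (ltStepB cs i) ((0, 0), result)).2) 0
      = (((Finset.range k).sup (ltH cs) : Nat) : Int) := by
  intro k
  induction k with
  | zero => intro _; simp
  | succ k ih =>
    intro hk
    rw [List.range_succ, List.foldl_append, List.foldl_cons, List.foldl_nil, ih (by omega)]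
    have hinit : ((((0 : Int), (0 : Int))), (((Finset.range k).sup (ltH cs) : Nat) : Int))
        = (ltS cs k - ltS cs k, (((Finset.range k).sup (ltH cs) : Nat) : Int)) := by
      rw [sub_self, Prod.mk_zero_zero]
    rw [hinit, ltB_inner cs k (cs.length - k) k ((Finset.range k).sup (ltH cs)) (le_refl k) (by omega)]
    rw [Nat.cast_inj]
    have hkn : k + (cs.length - k) = cs.length := by omega
    rw [hkn, Finset.range_add_one, Finset.sup_insert, sup_comm]
    rfl

theorem longestTriple_alt_eq (s : String) :
    longestTriple_alt s = (ltG s.toList : Int) := by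
  unfold longestTriple_alt ltG
  exact ltB_outer s.toList s.toList.length (le_refl _)

theorem ltG_eq_ltF (cs : List Char) : ltG cs = ltF cs cs.length := by
  apply le_antisymm
  · apply Finset.sup_le
    intro i hi
    apply Finset.sup_le
    intro u hu
    simp only [Finset.mem_filter, Finset.mem_Icc] at hu
    obtain ⟨⟨hu1, hu2⟩, hS⟩ := hu
    have hfi : ltFi cs u ≤ i := ltFi_min cs (by omega) hS.symm
    calc u - i ≤ u - ltFi cs u := Nat.sub_le_sub_left hfi u
    _ ≤ ltF cs cs.length :=
      Finset.le_sup (f := fun j => j - ltFi cs j) (Finset.mem_range.mpr (by omega))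
  · apply Finset.sup_le
    intro j hj
    rw [Finset.mem_range] at hj
    rcases eq_or_lt_of_le (ltFi_le cs j) with heq | hlt
    · simp [heq]
    · have hi : ltFi cs j < cs.length := by omega
      have hmem : j ∈ (Finset.Icc (ltFi cs j + 1) cs.length).filter
          (fun u => ltS cs u = ltS cs (ltFi cs j)) := by
        simp only [Finset.mem_filter, Finset.mem_Icc]
        exact ⟨⟨by omega, by omega⟩, (ltFi_state cs j).symm⟩
      have h1 : j - ltFi cs j ≤ ltH cs (ltFi cs j) := by
        unfold ltH; exact Finset.le_sup (f := fun u => u - ltFi cs j) hmem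
      exact le_trans h1 (Finset.le_sup (f := ltH cs) (Finset.mem_range.mpr hi))

-- ===== VERDICT (by name: the statement is the Claim_ definition above) =====
theorem longestTriple_spec : Claim_equal_longestTriple := by
  intro s _
  unfold Spec_longestTriple
  rw [longestTriple_eq, longestTriple_alt_eq, ltG_eq_ltF]
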